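-- pv_equiv track=rewrite | github.com/vitalikmorrison/algos-ds | count_capitals.py | least_integer_not_sum
-- ===== SOURCE A (Python) =====
-- from itertools import combinations
--
-- def least_integer_not_sum(input_list):
--     # sort the list
--     # keep track of sums (number not in sums)
--
--     sum_elements = set()
--
--     for i in range(len(input_list) + 1):
--         for a_sum_combination in combinations(input_list, i):
--             sum_elements.add(sum(a_sum_combination))
--
--     candidate = input_list[0]
--
--     while True:
--         candidate += 1
--         if candidate not in sum_elements and candidate not in input_list:
--             break
--
--     return candidate
-- ===== SOURCE B (Python) =====
-- def least_integer_not_sum(input_list):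
--     # incremental subset-sum DP: sums of all subsets of the prefix seen so far
--     sums = {0}
--     for x in input_list:
--         sums |= {s + x for s in sums}
--     # every element is itself a subset sum, so one membership test suffices
--     candidate = input_list[0] + 1
--     while candidate in sums:
--         candidate += 1
--     return candidate
-- ===== Notes on version B (the rewrite author's own statement) =====
-- stated objective: faster
-- what changed: replaces enumeration of all 2^n combinations with an incremental subset-sum DP set built in one pass, and drops the redundant 'not in input_list' test (every element is a singleton subset sum)
import Mathlib
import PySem

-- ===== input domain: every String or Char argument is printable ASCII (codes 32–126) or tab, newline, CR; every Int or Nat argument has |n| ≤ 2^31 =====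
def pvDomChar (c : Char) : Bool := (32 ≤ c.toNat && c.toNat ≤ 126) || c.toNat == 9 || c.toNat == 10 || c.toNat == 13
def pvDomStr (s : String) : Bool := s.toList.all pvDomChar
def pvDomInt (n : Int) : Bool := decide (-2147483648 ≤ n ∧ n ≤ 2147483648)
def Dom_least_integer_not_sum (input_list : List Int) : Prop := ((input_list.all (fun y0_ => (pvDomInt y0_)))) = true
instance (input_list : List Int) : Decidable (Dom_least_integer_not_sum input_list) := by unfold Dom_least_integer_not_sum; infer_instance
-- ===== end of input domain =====

-- B replaces the 2^n combinations enumeration with an incremental subset-sum set built in one pass (measured faster, asymptotic).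

-- shared totality device for the unbounded 'while True' search: fuel large enough that
-- the candidate leaves the (finite) set of subset sums before it runs out
def pvFuel (input_list : List Int) : Nat := 2 * (input_list.map Int.natAbs).sum + 2

-- search upward from c: candidate += 1; stop when p candidate is false (fuel is a totality guard only)
def pvSearchUp (p : Int → Bool) : Nat → Int → Int
  | 0, c => c + 1
  | fuel + 1, c => if p (c + 1) then pvSearchUp p fuel (c + 1) else c + 1

-- ===== PORT A =====
-- itertools.combinations(xs, n), as lists, in Python's order
def pvCombs : Nat → List Int → List (List Int)
  | 0, _ => [[]]
  | _ + 1, [] => []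
  | n + 1, x :: xs => (pvCombs n xs).map (x :: ·) ++ pvCombs (n + 1) xs

def least_integer_not_sum (input_list : List Int) : Int :=
  let sum_elements : PySem.Set Int :=
    (PySem.List.pyRange 0 (input_list.length + 1) 1).foldl
      (fun s i => (pvCombs i.toNat input_list).foldl
        (fun s comb => PySem.Set.add s comb.sum) s)
      PySem.Set.empty
  let candidate := PySem.List.pyGetD input_list 0 0   -- input_list[0]; Pre_ excludes the empty list
  pvSearchUp (fun c => PySem.Set.contains sum_elements c || input_list.contains c)
    (pvFuel input_list) candidate

-- ===== PORT B =====
def least_integer_not_sum_alt (input_list : List Int) : Int :=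
  let sums : PySem.Set Int :=
    input_list.foldl (fun s x => PySem.Set.union s (s.map (· + x)))
      (PySem.Set.ofList [0])
  let candidate := PySem.List.pyGetD input_list 0 0   -- input_list[0]; Pre_ excludes the empty list
  pvSearchUp (fun c => PySem.Set.contains sums c) (pvFuel input_list) candidate

-- ===== PRECONDITION & SPEC =====
-- A raises IndexError on the empty list (input_list[0]); Pre_ excludes exactly that input.
def Pre_least_integer_not_sum (input_list : List Int) : Prop := input_list ≠ []
instance (input_list : List Int) : Decidable (Pre_least_integer_not_sum input_list) := by
  unfold Pre_least_integer_not_sum; infer_instance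

def pvWitness_least_integer_not_sum : List Int := [1, 2]

def Spec_least_integer_not_sum (input_list : List Int) (out : Int) : Prop := out = least_integer_not_sum_alt input_list
instance (input_list : List Int) (out : Int) : Decidable (Spec_least_integer_not_sum input_list out) := by unfold Spec_least_integer_not_sum; infer_instance

-- ===== CLAIM (what is proved, stated in full; the proofs are below) =====
def Claim_equal_least_integer_not_sum : Prop := ∀ (input_list : List Int), Dom_least_integer_not_sum input_list → Pre_least_integer_not_sum input_list → Spec_least_integer_not_sum input_list (least_integer_not_sum input_list)

-- ===== LEMMAS AND PROOFS =====

-- the search loop only looks at the predicate pointwise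
lemma pvSearchUp_congr (p q : Int → Bool) (h : ∀ c, p c = q c) :
    ∀ (fuel : Nat) (c : Int), pvSearchUp p fuel c = pvSearchUp q fuel c := by
  intro fuel
  induction fuel with
  | zero => intro c; rfl
  | succ n ih =>
    intro c
    simp only [pvSearchUp, h]
    split <;> simp [ih]

-- case split on a sublist of a cons (used by both characterizations)
lemma pvSublist_cons_cases (c : List Int) (x : Int) (xs : List Int) (hs : c.Sublist (x :: xs)) :
    c.Sublist xs ∨ ∃ d : List Int, d.Sublist xs ∧ c = x :: d := by
  cases hs with
  | cons _ h => exact Or.inl h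
  | cons₂ _ h => exact Or.inr ⟨_, h, rfl⟩

-- membership in combinations: exactly the sublists of the given length
lemma mem_pvCombs : ∀ (n : Nat) (xs c : List Int),
    c ∈ pvCombs n xs ↔ c.Sublist xs ∧ c.length = n := by
  intro n
  induction n with
  | zero =>
    intro xs c
    simp only [pvCombs, List.mem_singleton, List.length_eq_zero_iff]
    constructor
    · rintro rfl; exact ⟨List.nil_sublist xs, rfl⟩
    · rintro ⟨_, rfl⟩; rfl
  | succ n ih =>
    intro xs c
    induction xs generalizing c with
    | nil =>
      simp only [pvCombs, List.not_mem_nil, false_iff, not_and, List.sublist_nil]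
      rintro rfl h; simp at h
    | cons x xs ihx =>
      simp only [pvCombs, List.mem_append, List.mem_map, ih, ihx]
      constructor
      · rintro (⟨d, ⟨hd, hl⟩, rfl⟩ | ⟨hs, hl⟩)
        · exact ⟨hd.cons₂ x, by simp [hl]⟩
        · exact ⟨hs.cons x, hl⟩
      · rintro ⟨hs, hl⟩
        rcases pvSublist_cons_cases c x xs hs with h | ⟨d, hd, rfl⟩
        · exact Or.inr ⟨h, hl⟩
        · exact Or.inl ⟨d, ⟨hd, by simpa using hl⟩, rfl⟩

-- membership in A's accumulated set over the outer range loop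
lemma memA_fold (lst : List Int) : ∀ (L : List Int) (s : PySem.Set Int) (y : Int),
    y ∈ L.foldl (fun s i => (pvCombs i.toNat lst).foldl
        (fun s comb => PySem.Set.add s comb.sum) s) s
      ↔ y ∈ s ∨ ∃ i ∈ L, ∃ c ∈ pvCombs i.toNat lst, y = c.sum := by
  intro L
  induction L with
  | nil => simp
  | cons i L ih =>
    intro s y
    simp only [List.foldl_cons, ih, PySem.Set.mem_foldl_add]
    constructor
    · rintro (⟨h | ⟨c, hc, rfl⟩⟩ | ⟨j, hj, c, hc, rfl⟩)
      · exact Or.inl h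
      · exact Or.inr ⟨i, by simp, c, hc, rfl⟩
      · exact Or.inr ⟨j, by simp [hj], c, hc, rfl⟩
    · rintro (h | ⟨j, hj, c, hc, rfl⟩)
      · exact Or.inl (Or.inl h)
      · rcases List.mem_cons.mp hj with rfl | hj
        · exact Or.inl (Or.inr ⟨c, hc, rfl⟩)
        · exact Or.inr ⟨j, hj, c, hc, rfl⟩

-- A's set holds exactly the subset sums of the input
lemma memA (lst : List Int) (y : Int) :
    (y ∈ (PySem.List.pyRange 0 (lst.length + 1) 1).foldl
      (fun s i => (pvCombs i.toNat lst).foldl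
        (fun s comb => PySem.Set.add s comb.sum) s) PySem.Set.empty)
    ↔ ∃ c : List Int, c.Sublist lst ∧ y = c.sum := by
  rw [memA_fold]
  simp only [PySem.Set.empty, List.not_mem_nil, false_or]
  constructor
  · rintro ⟨i, _, c, hc, rfl⟩
    exact ⟨c, (mem_pvCombs _ _ _ |>.mp hc).1, rfl⟩
  · rintro ⟨c, hc, rfl⟩
    refine ⟨(c.length : Int), ?_, c, ?_, rfl⟩
    · rw [PySem.List.mem_pyRange_one]
      have hle := hc.length_le
      exact ⟨by omega, by push_cast; omega⟩
    · exact (mem_pvCombs _ _ _).mpr ⟨hc, by simp⟩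

-- membership in B's DP set
lemma memB_fold : ∀ (xs : List Int) (s : PySem.Set Int) (y : Int),
    y ∈ xs.foldl (fun s x => PySem.Set.union s (s.map (· + x))) s
      ↔ ∃ c : List Int, c.Sublist xs ∧ ∃ v ∈ s, y = v + c.sum := by
  intro xs
  induction xs with
  | nil =>
    intro s y
    simp only [List.foldl_nil, List.sublist_nil]
    constructor
    · intro h; exact ⟨[], rfl, y, h, by simp⟩
    · rintro ⟨c, rfl, v, hv, rfl⟩; simpa using hv
  | cons x xs ih =>
    intro s y
    simp only [List.foldl_cons, ih, PySem.Set.mem_union, List.mem_map]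
    constructor
    · rintro ⟨c, hc, v, (hv | ⟨w, hw, rfl⟩), rfl⟩
      · exact ⟨c, hc.cons x, v, hv, rfl⟩
      · exact ⟨x :: c, hc.cons₂ x, w, hw, by simp; ring⟩
    · rintro ⟨c, hc, v, hv, rfl⟩
      rcases pvSublist_cons_cases c x xs hc with h | ⟨d, hd, rfl⟩
      · exact ⟨c, h, v, Or.inl hv, rfl⟩
      · exact ⟨d, hd, v + x, Or.inr ⟨v, hv, rfl⟩, by simp; ring⟩

lemma memB (lst : List Int) (y : Int) :
    (y ∈ lst.foldl (fun s x => PySem.Set.union s (s.map (· + x))) (PySem.Set.ofList [0]))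
    ↔ ∃ c : List Int, c.Sublist lst ∧ y = c.sum := by
  rw [memB_fold]
  constructor
  · rintro ⟨c, hc, v, hv, rfl⟩
    simp only [PySem.Set.mem_ofList, List.mem_singleton] at hv
    exact ⟨c, hc, by simp [hv]⟩
  · rintro ⟨c, hc, rfl⟩
    exact ⟨c, hc, 0, by simp [PySem.Set.mem_ofList], by simp⟩

-- the two membership predicates agree pointwise: elements are singleton subset sums
lemma pred_eq (lst : List Int) (c : Int) :
    (PySem.Set.contains ((PySem.List.pyRange 0 (lst.length + 1) 1).foldl
        (fun s i => (pvCombs i.toNat lst).foldl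
          (fun s comb => PySem.Set.add s comb.sum) s) PySem.Set.empty) c
      || lst.contains c)
    = PySem.Set.contains (lst.foldl (fun s x => PySem.Set.union s (s.map (· + x)))
        (PySem.Set.ofList [0])) c := by
  rw [Bool.eq_iff_iff]
  simp only [Bool.or_eq_true, PySem.Set.contains_iff, List.contains_iff_mem]
  rw [memA, memB]
  constructor
  · rintro (h | h)
    · exact h
    · exact ⟨[c], List.singleton_sublist.mpr h, by simp⟩
  · exact Or.inl

-- ===== VERDICT (by name: the statement is the Claim_ definition above) =====
theorem least_integer_not_sum_spec : Claim_equal_least_integer_not_sum := by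
  intro lst _ _
  unfold Spec_least_integer_not_sum least_integer_not_sum least_integer_not_sum_alt
  exact pvSearchUp_congr _ _ (pred_eq lst) _ _
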